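-- pv_equiv track=rewrite | github.com/MrHamdulay/csc3-capstone | examples/data/Assignment_7/frnpau013/util.py | no_vertical_adj_eq
-- ===== SOURCE A (Python) =====
-- def no_vertical_adj_eq(grid):
--     """returns True there are no vertically equal adjacent numbers in a 2xn grid; otherwise False"""
--     grid = grid[:2]
--     if len(grid) < 2:
--         return True
--     else:
--         if grid[0] == []:
--             return True
--         else:
--             if grid[0][0] == grid[1][0]:
--                 return False
--             else:
--                 y = []
--                 for i in range(2):
--                     y.append(grid[i - 1][1:])
--                 x = no_vertical_adj_eq(y)
--                 return x
-- ===== SOURCE B (Python) =====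
-- def no_vertical_adj_eq(grid):
--     """returns True there are no vertically equal adjacent numbers in a 2xn grid; otherwise False"""
--     if len(grid) < 2:
--         return True
--     return all(a != b for a, b in zip(grid[0], grid[1]))
-- ===== Notes on version B (the rewrite author's own statement) =====
-- stated objective: simpler
-- what changed: replaced the recursion that rebuilds two sliced rows at every step with a single zip-scan of the two rows, no copying and no recursion
import Mathlib
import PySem

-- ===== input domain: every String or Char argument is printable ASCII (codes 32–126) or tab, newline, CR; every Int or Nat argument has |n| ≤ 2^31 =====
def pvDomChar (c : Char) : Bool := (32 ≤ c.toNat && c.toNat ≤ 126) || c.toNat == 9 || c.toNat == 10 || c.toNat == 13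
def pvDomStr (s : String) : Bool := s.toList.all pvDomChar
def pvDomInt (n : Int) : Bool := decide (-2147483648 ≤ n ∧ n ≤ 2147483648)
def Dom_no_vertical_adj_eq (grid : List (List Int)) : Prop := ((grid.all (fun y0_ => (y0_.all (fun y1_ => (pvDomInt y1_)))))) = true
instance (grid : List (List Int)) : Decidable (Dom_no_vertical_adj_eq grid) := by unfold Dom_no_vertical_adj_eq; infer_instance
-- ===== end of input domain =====

-- B replaces A's recursion (which copies both rows at every step) by one zip-scan of the
-- first two rows.
-- Equivalence is about the RETURN value; neither program mutates its argument observably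
-- (A rebinds the local name only).

-- ===== PORT A =====
-- Literal transliteration of A: grid[:2] is `List.take 2` (exact for this nonneg slice),
-- grid[i][0] is `PySem.List.pyGet? _ 0` (none = IndexError, excluded by Pre_),
-- row[1:] is `List.drop 1` (exact for this nonneg slice); y = [grid[-1][1:], grid[0][1:]].
def no_vertical_adj_eq (grid : List (List Int)) : Bool :=
  match h : grid.take 2 with
  | a :: b :: _ =>
    if a = ([] : List Int) then true
    else
      match PySem.List.pyGet? a 0, PySem.List.pyGet? b 0 with
      | some x, some y =>
        if x = y then false
        else no_vertical_adj_eq [b.drop 1, a.drop 1]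
      | _, _ => false   -- Python raises IndexError here; outside Pre_
  | _ => true           -- len(grid) < 2
termination_by ((grid.take 2).map List.length).sum
decreasing_by
  have ha : a ≠ [] := by assumption
  have h1 : 1 ≤ a.length := List.length_pos_of_ne_nil ha
  simp [h]
  omega

-- ===== PORT B =====
def no_vertical_adj_eq_alt (grid : List (List Int)) : Bool :=
  if grid.length < 2 then true
  else ((grid.getD 0 []).zip (grid.getD 1 [])).all (fun p => p.1 != p.2)

-- ===== PRECONDITION & SPEC =====
-- condRows a b: the condition on the first two rows under which A terminates normally —
-- an equal vertical pair exists in the common prefix, or the row lengths/parities make the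
-- alternating recursion run off the first row first.
def condRows (a b : List Int) : Prop :=
  (∃ k < min a.length b.length, a.getD k 0 = b.getD k 0) ∨
  a.length = b.length ∨
  (a.length < b.length ∧ Even a.length) ∨
  (b.length < a.length ∧ Odd b.length)

-- Pre_ excludes exactly the ragged grids on which A raises IndexError: two rows of lengths
-- m ≠ n with no equal pair in their common prefix, where the parity of min m n makes A's
-- alternating recursion index past the end of the shorter row.
def Pre_no_vertical_adj_eq (grid : List (List Int)) : Prop :=
  2 ≤ grid.length → condRows (grid.getD 0 []) (grid.getD 1 [])
instance (grid : List (List Int)) : Decidable (Pre_no_vertical_adj_eq grid) := by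
  unfold Pre_no_vertical_adj_eq condRows; infer_instance
def pvWitness_no_vertical_adj_eq : List (List Int) := [[1, 2], [3, 4]]

def Spec_no_vertical_adj_eq (grid : List (List Int)) (out : Bool) : Prop := out = no_vertical_adj_eq_alt grid
instance (grid : List (List Int)) (out : Bool) : Decidable (Spec_no_vertical_adj_eq grid out) := by unfold Spec_no_vertical_adj_eq; infer_instance

-- ===== CLAIM (what is proved, stated in full; the proofs are below) =====
def Claim_equal_no_vertical_adj_eq : Prop := ∀ (grid : List (List Int)), Dom_no_vertical_adj_eq grid → Pre_no_vertical_adj_eq grid → Spec_no_vertical_adj_eq grid (no_vertical_adj_eq grid)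

-- ===== LEMMAS AND PROOFS =====

-- all-unequal over zip is symmetric in the two rows
lemma zip_all_ne_comm (a b : List Int) :
    (a.zip b).all (fun p => p.1 != p.2) = (b.zip a).all (fun p => p.1 != p.2) := by
  induction a generalizing b with
  | nil => cases b <;> simp
  | cons x a' ih =>
    cases b with
    | nil => simp
    | cons y b' => simp [ih, bne_comm]

lemma condRows_step (x y : Int) (a' b' : List Int) (hxy : x ≠ y)
    (h : condRows (x :: a') (y :: b')) : condRows b' a' := by
  unfold condRows at h ⊢
  rcases h with ⟨k, hk, he⟩ | h | ⟨h, he⟩ | ⟨h, he⟩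
  · cases k with
    | zero => exact absurd (by simpa using he) hxy
    | succ k' =>
      left
      exact ⟨k', by simp at hk; omega, by simpa [List.getD_cons_succ, eq_comm] using he⟩
  · right; left; simp at h; omega
  · right; right; right
    constructor
    · simp at h; omega
    · simpa [Nat.even_add_one, Nat.not_even_iff_odd] using he
  · right; right; left
    constructor
    · simp at h; omega
    · simpa [Nat.odd_add_one] using he

lemma main_lemma (n : Nat) (a b : List Int) (t : List (List Int))
    (hn : a.length + b.length ≤ n) (hc : condRows a b) :
    no_vertical_adj_eq (a :: b :: t) = (a.zip b).all (fun p => p.1 != p.2) := by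
  induction n generalizing a b t with
  | zero =>
    have ha : a = [] := by cases a <;> simp_all
    subst ha
    simp [no_vertical_adj_eq]
  | succ n ih =>
    cases a with
    | nil => simp [no_vertical_adj_eq]
    | cons x a' =>
      cases b with
      | nil =>
        exfalso
        unfold condRows at hc
        rcases hc with ⟨k, hk, _⟩ | h | ⟨h, _⟩ | ⟨_, he⟩
        · simp at hk
        · simp at h
        · simp at h
        · simp [Nat.odd_iff] at he
      | cons y b' =>
        by_cases hxy : x = y
        · subst hxy
          unfold no_vertical_adj_eq
          simp [PySem.List.pyGet?, PySem.List.pyIdx?]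
        · have hc' := condRows_step x y a' b' hxy hc
          unfold no_vertical_adj_eq
          simp only [List.take, if_neg (by simp : ¬(x :: a' = ([] : List Int)))]
          simp only [PySem.List.pyGet?, PySem.List.pyIdx?]
          simp only [List.length_cons]
          have := ih b' a' [] (by simp at hn ⊢; omega) hc'
          simp [hxy, this, zip_all_ne_comm a' b']

-- ===== VERDICT (by name: the statement is the Claim_ definition above) =====
theorem no_vertical_adj_eq_spec : Claim_equal_no_vertical_adj_eq := by
  intro grid _ hpre
  unfold Spec_no_vertical_adj_eq
  match grid with
  | [] => simp [no_vertical_adj_eq, no_vertical_adj_eq_alt]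
  | [r] => simp [no_vertical_adj_eq, no_vertical_adj_eq_alt]
  | a :: b :: t =>
    have hc : condRows a b := hpre (by simp)
    have := main_lemma (a.length + b.length) a b t le_rfl hc
    simp [no_vertical_adj_eq_alt, this]
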